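-- pv_equiv track=rewrite | github.com/chatsci/Aeiva | src/aeiva/cognition/memory/summary_memory.py | _strip_summary_sections
-- ===== SOURCE A (Python) =====
-- from typing import Any, Dict, List, Optional, Sequence, Tuple, Union
--
-- def _strip_summary_sections(text: str) -> str:
--     if not text:
--         return ""
--     lines = text.splitlines()
--     stripped: List[str] = []
--     skipping = False
--     for line in lines:
--         if line.startswith("### ") and "Summary" in line:
--             skipping = True
--             continue
--         if skipping and (line.startswith("### ") or line.startswith("## ")):
--             skipping = False
--         if not skipping:
--             stripped.append(line)
--     return "\n".join(stripped).strip()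
-- ===== SOURCE B (Python) =====
-- def _strip_summary_sections(text: str) -> str:
--     if not text:
--         return ""
--     lines = text.splitlines()
--     stripped = []
--     i = 0
--     n = len(lines)
--     while i < n:
--         line = lines[i]
--         if line.startswith("### ") and "Summary" in line:
--             i += 1
--             while i < n and not (lines[i].startswith("### ") or lines[i].startswith("## ")):
--                 i += 1
--         else:
--             stripped.append(line)
--             i += 1
--     return "\n".join(stripped).strip()
-- ===== Notes on version B (the rewrite author's own statement) =====
-- stated objective: alternative
-- what changed: Replaces the boolean state flag threaded through a single filter loop by an index-driven outer loop with an inner while loop that skips a whole summary section at once, leaving the terminating header to be reprocessed.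
import Mathlib
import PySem

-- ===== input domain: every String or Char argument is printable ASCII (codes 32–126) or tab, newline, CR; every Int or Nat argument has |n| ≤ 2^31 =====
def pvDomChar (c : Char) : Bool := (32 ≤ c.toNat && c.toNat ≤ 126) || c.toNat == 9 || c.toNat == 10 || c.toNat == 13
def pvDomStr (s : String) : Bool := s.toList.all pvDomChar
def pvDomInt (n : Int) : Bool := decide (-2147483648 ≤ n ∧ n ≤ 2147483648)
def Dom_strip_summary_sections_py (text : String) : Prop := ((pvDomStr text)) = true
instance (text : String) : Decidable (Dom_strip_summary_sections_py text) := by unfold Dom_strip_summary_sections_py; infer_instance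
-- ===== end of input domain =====

-- B replaces A's boolean 'skipping' flag by an index loop with an inner skip-to-next-header loop (alternative decomposition, same cost).


-- ===== PORT A =====
def strip_summary_sections_py (text : String) : String :=
  if text == "" then ""
  else
    let lines := PySem.Str.splitlines text
    let res := lines.foldl (fun (st : List String × Bool) line =>
      if PySem.Str.startswith line "### " && PySem.Str.isIn "Summary" line then
        (st.1, true)
      else
        let skipping := if st.2 && (PySem.Str.startswith line "### " || PySem.Str.startswith line "## ") then false else st.2
        if !skipping then (st.1 ++ [line], skipping) else (st.1, skipping)) ([], false)
    PySem.Str.strip (PySem.Str.join "\n" res.1)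

-- ===== PORT B =====
def pvIsSummaryHeader (l : String) : Bool :=
  PySem.Str.startswith l "### " && PySem.Str.isIn "Summary" l

def pvIsHeader (l : String) : Bool :=
  PySem.Str.startswith l "### " || PySem.Str.startswith l "## "

-- outer loop over the suffix of lines at index i; the inner while loop is the dropWhile
def pvGoB : List String → List String
  | [] => []
  | l :: rest =>
    if pvIsSummaryHeader l then
      pvGoB (rest.dropWhile (fun x => !pvIsHeader x))
    else
      l :: pvGoB rest
termination_by ls => ls.length
decreasing_by
  · exact Nat.lt_succ_of_le (List.length_dropWhile_le _ _)
  · simp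

def strip_summary_sections_py_alt (text : String) : String :=
  if text == "" then ""
  else
    PySem.Str.strip (PySem.Str.join "\n" (pvGoB (PySem.Str.splitlines text)))

-- ===== PRECONDITION & SPEC =====
def Spec_strip_summary_sections_py (text : String) (out : String) : Prop := out = strip_summary_sections_py_alt text
instance (text : String) (out : String) : Decidable (Spec_strip_summary_sections_py text out) := by unfold Spec_strip_summary_sections_py; infer_instance

-- ===== CLAIM (what is proved, stated in full; the proofs are below) =====
def Claim_equal_strip_summary_sections_py : Prop := ∀ (text : String), Dom_strip_summary_sections_py text → Spec_strip_summary_sections_py text (strip_summary_sections_py text)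

-- ===== LEMMAS AND PROOFS =====

-- A's per-line step, as a pure forward recursion on the remaining lines
def pvResA : Bool → List String → List String
  | _, [] => []
  | skipping, l :: rest =>
    if pvIsSummaryHeader l then pvResA true rest
    else
      let sk := if skipping && pvIsHeader l then false else skipping
      if !sk then l :: pvResA sk rest else pvResA sk rest

lemma pvFoldA (lines : List String) : ∀ (acc : List String) (b : Bool),
    (lines.foldl (fun (st : List String × Bool) line =>
      if PySem.Str.startswith line "### " && PySem.Str.isIn "Summary" line then
        (st.1, true)
      else
        let skipping := if st.2 && (PySem.Str.startswith line "### " || PySem.Str.startswith line "## ") then false else st.2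
        if !skipping then (st.1 ++ [line], skipping) else (st.1, skipping)) (acc, b)).1
    = acc ++ pvResA b lines := by
  induction lines with
  | nil => intro acc b; simp [pvResA]
  | cons l rest ih =>
    intro acc b
    simp only [List.foldl_cons, pvResA, pvIsSummaryHeader, pvIsHeader]
    by_cases hs : (PySem.Str.startswith l "### " && PySem.Str.isIn "Summary" l) = true
    · simp only [hs, if_true]
      rw [ih]
    · simp only [Bool.not_eq_true] at hs
      simp only [hs]
      by_cases hb : (b && (PySem.Str.startswith l "### " || PySem.Str.startswith l "## ")) = true
      · simp only [hb]
        exact (ih _ _).trans (by simp)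
      · simp only [Bool.not_eq_true] at hb
        simp only [hb]
        cases b
        · exact (ih _ _).trans (by simp)
        · exact (ih _ _).trans (by simp)

lemma pvSum_header {l : String} (h : pvIsSummaryHeader l = true) : pvIsHeader l = true := by
  simp only [pvIsSummaryHeader, Bool.and_eq_true] at h
  simp only [pvIsHeader, h.1, Bool.true_or]

lemma pvGoB_nil : pvGoB [] = [] := by rw [pvGoB.eq_def]

lemma pvResA_goB : ∀ (n : Nat) (lines : List String), lines.length ≤ n →
    pvResA false lines = pvGoB lines ∧
    pvResA true lines = pvGoB (lines.dropWhile (fun x => !pvIsHeader x)) := by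
  intro n
  induction n with
  | zero =>
    intro lines h
    have : lines = [] := List.eq_nil_of_length_eq_zero (Nat.le_zero.mp h)
    subst this; simp [pvResA, pvGoB_nil]
  | succ n ih =>
    intro lines h
    cases lines with
    | nil => simp [pvResA, pvGoB_nil]
    | cons l rest =>
      simp only [List.length_cons, Nat.succ_le_succ_iff] at h
      constructor
      · rw [pvResA, pvGoB]
        by_cases hs : pvIsSummaryHeader l = true
        · simp only [hs, if_true]
          exact (ih rest h).2
        · simp only [Bool.not_eq_true] at hs
          simp [hs, (ih rest h).1]
      · rw [pvResA, List.dropWhile]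
        by_cases hh : pvIsHeader l = true
        · by_cases hs : pvIsSummaryHeader l = true
          · simp [hh, hs, pvGoB, (ih rest h).2]
          · simp only [Bool.not_eq_true] at hs
            simp [hh, hs, pvGoB, (ih rest h).1]
        · have hs : pvIsSummaryHeader l = false := by
            cases hsb : pvIsSummaryHeader l
            · rfl
            · exact absurd (pvSum_header hsb) hh
          simp only [Bool.not_eq_true] at hh
          simp [hh, hs, (ih rest h).2]

-- ===== VERDICT (by name: the statement is the Claim_ definition above) =====
theorem strip_summary_sections_py_spec : Claim_equal_strip_summary_sections_py := by
  intro text _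
  unfold Spec_strip_summary_sections_py strip_summary_sections_py strip_summary_sections_py_alt
  by_cases h : text == ""
  · simp [h]
  · simp only [h]
    rw [pvFoldA, (pvResA_goB (PySem.Str.splitlines text).length _ le_rfl).1]
    simp
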